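-- pv_equiv track=rewrite | github.com/hrithikkothari1234/Sem-4 | Python/Tutorial1/tut.py | onehop
-- ===== SOURCE A (Python) =====
-- def onehop(l):
--     oh=[]
--
--     for i in range(0, len(l)):
--         for j in range(0, len(l)):
--             if l[i][1]==l[j][0] and l[i][0]!=l[j][1]:
--                 oh += [(l[i][0], l[j][1])]
--
--     myset=set(oh)
--     return(sorted(myset))
-- ===== SOURCE B (Python) =====
-- def onehop(l):
--     idx = {}
--     for a, b in l:
--         idx.setdefault(a, []).append(b)
--     res = set()
--     for a, b in l:
--         for d in idx.get(b, []):
--             if a != d: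
--                 res.add((a, d))
--     return sorted(res)
-- ===== Notes on version B (the rewrite author's own statement) =====
-- stated objective: faster
-- what changed: Replaces A's all-pairs double scan with a dict indexing edges by start node, so each edge only visits its matching successors, and collects pairs directly into a set instead of deduplicating a list afterwards.
import Mathlib
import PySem

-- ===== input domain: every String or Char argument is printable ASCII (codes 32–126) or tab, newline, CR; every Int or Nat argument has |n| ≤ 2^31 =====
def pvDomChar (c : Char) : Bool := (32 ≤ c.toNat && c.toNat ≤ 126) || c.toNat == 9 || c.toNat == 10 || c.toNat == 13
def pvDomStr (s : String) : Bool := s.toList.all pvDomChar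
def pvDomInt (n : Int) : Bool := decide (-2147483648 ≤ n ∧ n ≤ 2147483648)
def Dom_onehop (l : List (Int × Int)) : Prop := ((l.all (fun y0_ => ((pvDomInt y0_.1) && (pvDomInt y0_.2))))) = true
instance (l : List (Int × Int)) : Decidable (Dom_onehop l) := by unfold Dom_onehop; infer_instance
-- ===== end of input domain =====

-- B indexes edges by start node in a dict and scans only matching successors, collecting pairs directly into a set (A scans all pairs of edges and deduplicates afterwards).

-- ===== PORT A =====
def onehopOh (l : List (Int × Int)) : List (Int × Int) :=
  (PySem.List.pyRange 0 l.length).foldl (fun oh i =>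
    (PySem.List.pyRange 0 l.length).foldl (fun oh j =>
      if (PySem.List.pyGetD l i (0, 0)).2 == (PySem.List.pyGetD l j (0, 0)).1 &&
         (PySem.List.pyGetD l i (0, 0)).1 != (PySem.List.pyGetD l j (0, 0)).2 then
        oh ++ [((PySem.List.pyGetD l i (0, 0)).1, (PySem.List.pyGetD l j (0, 0)).2)]
      else oh) oh) []

def onehop (l : List (Int × Int)) : List (Int × Int) :=
  PySem.List.sorted2 (PySem.Set.ofList (onehopOh l)) Prod.fst Prod.snd

-- ===== PORT B =====
def onehopIdx (l : List (Int × Int)) : PySem.Dict Int (List Int) :=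
  l.foldl (fun d p => d.modify p.1 [] (fun v => v ++ [p.2])) PySem.Dict.empty

def onehopRes (l : List (Int × Int)) : PySem.Set (Int × Int) :=
  l.foldl (fun s p =>
    ((onehopIdx l).getD p.2 []).foldl
      (fun s d => if p.1 ≠ d then PySem.Set.add s (p.1, d) else s) s) PySem.Set.empty

def onehop_alt (l : List (Int × Int)) : List (Int × Int) :=
  PySem.List.sorted2 (onehopRes l) Prod.fst Prod.snd

-- ===== PRECONDITION & SPEC =====
def Spec_onehop (l : List (Int × Int)) (out : List (Int × Int)) : Prop := out = onehop_alt l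
instance (l : List (Int × Int)) (out : List (Int × Int)) : Decidable (Spec_onehop l out) := by unfold Spec_onehop; infer_instance

-- ===== CLAIM (what is proved, stated in full; the proofs are below) =====
def Claim_equal_onehop : Prop := ∀ (l : List (Int × Int)), Dom_onehop l → Spec_onehop l (onehop l)

-- ===== LEMMAS AND PROOFS =====

-- the abstract relation both programs collect: a one-hop pair of two edges of l
def OneHopRel (l : List (Int × Int)) (x : Int × Int) : Prop :=
  ∃ p ∈ l, ∃ q ∈ l, p.2 = q.1 ∧ p.1 ≠ q.2 ∧ x = (p.1, q.2)

theorem mem_onehopOh (l : List (Int × Int)) (x : Int × Int) :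
    x ∈ onehopOh l ↔ OneHopRel l x := by
  unfold onehopOh OneHopRel
  rw [PySem.List.foldl_congr_mem (PySem.List.pyRange 0 l.length) _
    (fun oh i => oh ++ ((PySem.List.pyRange 0 l.length).filter (fun j =>
      (PySem.List.pyGetD l i (0, 0)).2 == (PySem.List.pyGetD l j (0, 0)).1 &&
      (PySem.List.pyGetD l i (0, 0)).1 != (PySem.List.pyGetD l j (0, 0)).2)).map
      (fun j => ((PySem.List.pyGetD l i (0, 0)).1, (PySem.List.pyGetD l j (0, 0)).2)))
    [] (fun acc i _ => PySem.List.foldl_append_if _ _ _ _)]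
  rw [PySem.List.foldl_append_eq_flatMap]
  simp only [List.nil_append, List.mem_flatMap, List.mem_map, List.mem_filter,
    PySem.List.mem_pyRange_one, Bool.and_eq_true, beq_iff_eq, bne_iff_ne, ne_eq]
  constructor
  · rintro ⟨i, ⟨hi0, hi1⟩, j, ⟨⟨hj0, hj1⟩, heq, hne⟩, hx⟩
    rw [PySem.List.pyGetD_eq_getElem _ _ hi0 hi1, PySem.List.pyGetD_eq_getElem _ _ hj0 hj1] at heq hne hx
    exact ⟨l[i.toNat], List.getElem_mem _, l[j.toNat], List.getElem_mem _, heq, hne, hx.symm⟩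
  · rintro ⟨p, hp, q, hq, heq, hne, hx⟩
    obtain ⟨i, hi, hpi⟩ := List.getElem_of_mem hp
    obtain ⟨j, hj, hqj⟩ := List.getElem_of_mem hq
    refine ⟨(i : Int), ⟨by positivity, by exact_mod_cast hi⟩,
            (j : Int), ⟨⟨by positivity, by exact_mod_cast hj⟩, ?_, ?_⟩, ?_⟩ <;>
      rw [PySem.List.pyGetD_eq_getElem _ _ (by positivity) (by exact_mod_cast hi),
          PySem.List.pyGetD_eq_getElem _ _ (by positivity) (by exact_mod_cast hj)] <;>
      simp [Int.toNat_natCast, hpi, hqj, heq, hne, hx]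

theorem getD_onehopIdx (l : List (Int × Int)) (b : Int) :
    (onehopIdx l).getD b [] = (l.filter (fun p => p.1 == b)).map (fun p => p.2) := by
  unfold onehopIdx
  have := PySem.Dict.getD_foldl_modify_append l (PySem.Dict.empty (κ := Int) (ν := List Int)) b
  simpa [PySem.Dict.getD_empty] using this

theorem mem_foldl_add_if (a : Int) (x : Int × Int) (ys : List Int) (s : PySem.Set (Int × Int)) :
    x ∈ ys.foldl (fun s d => if a ≠ d then PySem.Set.add s (a, d) else s) s ↔
      x ∈ s ∨ ∃ d ∈ ys, a ≠ d ∧ x = (a, d) := by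
  induction ys generalizing s with
  | nil => simp
  | cons y t ih =>
    simp only [List.foldl_cons]
    split_ifs with h
    · rw [ih]; simp only [PySem.Set.mem_add, List.mem_cons]; aesop
    · rw [ih]; simp only [List.mem_cons]; aesop

theorem nodup_foldl_add_if (a : Int) (ys : List Int) (s : PySem.Set (Int × Int)) (hs : s.Nodup) :
    (ys.foldl (fun s d => if a ≠ d then PySem.Set.add s (a, d) else s) s).Nodup := by
  induction ys generalizing s with
  | nil => exact hs
  | cons y t ih =>
    simp only [List.foldl_cons]
    split
    · exact ih _ (PySem.Set.nodup_add _ _ hs)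
    · exact ih _ hs

theorem mem_foldl_outer (g : Int → List Int) (x : Int × Int) (l' : List (Int × Int))
    (s : PySem.Set (Int × Int)) :
    x ∈ l'.foldl (fun s p => (g p.2).foldl
        (fun s d => if p.1 ≠ d then PySem.Set.add s (p.1, d) else s) s) s ↔
      x ∈ s ∨ ∃ p ∈ l', ∃ d ∈ g p.2, p.1 ≠ d ∧ x = (p.1, d) := by
  induction l' generalizing s with
  | nil => simp
  | cons p t ih =>
    simp only [List.foldl_cons]
    rw [ih]
    simp only [mem_foldl_add_if, List.mem_cons]
    constructor
    · rintro ((h1 | ⟨d, hd, hne, hx⟩) | ⟨q, hq, d, hd, hne, hx⟩)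
      · exact Or.inl h1
      · exact Or.inr ⟨p, Or.inl rfl, d, hd, hne, hx⟩
      · exact Or.inr ⟨q, Or.inr hq, d, hd, hne, hx⟩
    · rintro (h1 | ⟨q, (rfl | hq), d, hd, hne, hx⟩)
      · exact Or.inl (Or.inl h1)
      · exact Or.inl (Or.inr ⟨d, hd, hne, hx⟩)
      · exact Or.inr ⟨q, hq, d, hd, hne, hx⟩

theorem nodup_foldl_outer (g : Int → List Int) (l' : List (Int × Int))
    (s : PySem.Set (Int × Int)) (hs : s.Nodup) :
    (l'.foldl (fun s p => (g p.2).foldl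
        (fun s d => if p.1 ≠ d then PySem.Set.add s (p.1, d) else s) s) s).Nodup := by
  induction l' generalizing s with
  | nil => exact hs
  | cons p t ih => exact ih _ (nodup_foldl_add_if _ _ _ hs)

theorem mem_onehopRes (l : List (Int × Int)) (x : Int × Int) :
    x ∈ onehopRes l ↔ OneHopRel l x := by
  unfold onehopRes OneHopRel
  refine Iff.trans (mem_foldl_outer (fun b => (onehopIdx l).getD b []) x l PySem.Set.empty) ?_
  simp only [PySem.Set.empty, List.not_mem_nil, false_or, getD_onehopIdx,
    List.mem_map, List.mem_filter, beq_iff_eq]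
  constructor
  · rintro ⟨p, hp, d, ⟨q, ⟨hq, hq1⟩, rfl⟩, hne, hx⟩
    exact ⟨p, hp, q, hq, hq1.symm, hne, hx⟩
  · rintro ⟨p, hp, q, hq, heq, hne, hx⟩
    exact ⟨p, hp, q.2, ⟨q, ⟨hq, heq.symm⟩, rfl⟩, hne, hx⟩

theorem nodup_onehopRes (l : List (Int × Int)) : (onehopRes l).Nodup := by
  unfold onehopRes
  exact nodup_foldl_outer (fun b => (onehopIdx l).getD b []) l PySem.Set.empty List.nodup_nil

-- sorted2 with keys fst, snd IS sorted with the lexicographic key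
theorem sorted2_eq_sorted_lex (xs : List (Int × Int)) :
    PySem.List.sorted2 xs Prod.fst Prod.snd = PySem.List.sorted xs (fun p => toLex p) := by
  show List.foldl (fun acc x => PySem.List.insertBy
      (fun a b => decide (a.1 < b.1) || (!decide (b.1 < a.1) && decide (a.2 < b.2))) x acc) [] xs
    = List.foldl (fun acc x => PySem.List.insertBy
      (fun a b => decide (toLex a < toLex b)) x acc) [] xs
  have hb : (fun (a b : Int × Int) => decide (a.1 < b.1) || (!decide (b.1 < a.1) && decide (a.2 < b.2)))
      = fun a b => decide (toLex a < toLex b) := by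
    funext a b
    by_cases h1 : a.1 < b.1 <;> by_cases h2 : b.1 < a.1 <;> by_cases h3 : a.2 < b.2 <;>
      simp [h1, h2, h3, Prod.Lex.lt_iff] <;> omega
  rw [hb]

theorem onehop_sets_perm (l : List (Int × Int)) :
    (PySem.Set.ofList (onehopOh l)).Perm (onehopRes l) := by
  rw [List.perm_ext_iff_of_nodup (PySem.Set.nodup_ofList (onehopOh l)) (nodup_onehopRes l)]
  intro a
  rw [PySem.Set.mem_ofList, mem_onehopOh, mem_onehopRes]

-- ===== VERDICT (by name: the statement is the Claim_ definition above) =====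
theorem onehop_spec : Claim_equal_onehop := by
  intro l _
  unfold Spec_onehop onehop onehop_alt
  rw [sorted2_eq_sorted_lex, sorted2_eq_sorted_lex]
  exact PySem.List.sorted_eq_sorted_of_perm _ _ _ (fun a b h => by simpa using h)
    (onehop_sets_perm l)
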